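-- pv_equiv track=rewrite | github.com/invst-git/legalEase | app/services.py | _best_scored_window
-- ===== SOURCE A (Python) =====
-- def _best_scored_window(q_tokens: list[str], salient: set[str], page_norm: str) -> tuple[int, int, int, int] | None:
--     """Return the best matching window (start,end,tokens_matched,salient_count)
--     by scanning all contiguous token windows (len -> 3). Requires at least one
--     salient token in the window to avoid generic matches.
--     """
--     if not q_tokens:
--         return None
--     token_join = ' '.join
--     best: tuple[int,int,int,int] | None = None
--     # Try decreasing window sizes
--     for win in range(len(q_tokens), 2, -1):
--         for i in range(0, len(q_tokens) - win + 1):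
--             window = q_tokens[i:i+win]
--             sal_count = sum(1 for t in window if t in salient)
--             if sal_count == 0:
--                 continue  # skip generic windows
--             phrase = token_join(window)
--             pos = page_norm.find(phrase)
--             if pos >= 0:
--                 cand = (pos, pos + len(phrase), win, sal_count)
--                 if best is None:
--                     best = cand
--                 else:
--                     # Prefer more tokens, then more salient, then earlier position
--                     if cand[2] > best[2] or (cand[2] == best[2] and cand[3] > best[3]) or (cand[2] == best[2] and cand[3] == best[3] and cand[0] < best[0]):
--                         best = cand
--         if best is not None:
--             # early break if we found a window of this size
--             break
--     return best
-- ===== SOURCE B (Python) =====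
-- def _best_scored_window(q_tokens: list[str], salient: set[str], page_norm: str) -> tuple[int, int, int, int] | None:
--     """Same result as the scanning version, but: salient counts come from one
--     prefix-sum pass instead of a per-window scan, and each window size collects
--     its candidates once and picks the best with max() on the key (salient, -pos)."""
--     n = len(q_tokens)
--     pref = [0] * (n + 1)
--     for j, t in enumerate(q_tokens):
--         pref[j + 1] = pref[j] + (1 if t in salient else 0)
--     for win in range(n, 2, -1):
--         cands = []
--         for i in range(n - win + 1):
--             sal = pref[i + win] - pref[i]
--             if sal == 0:
--                 continue
--             phrase = ' '.join(q_tokens[i:i + win])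
--             pos = page_norm.find(phrase)
--             if pos >= 0:
--                 cands.append((pos, pos + len(phrase), win, sal))
--         if cands:
--             return max(cands, key=lambda c: (c[3], -c[0]))
--     return None
-- ===== Notes on version B (the rewrite author's own statement) =====
-- stated objective: faster
-- what changed: Per-window salient scans are replaced by one prefix-sum pass over the tokens (so generic windows are skipped in O(1) without joining/searching), and each window size collects its matching candidates once and picks the winner with a single max() on the key (salient_count, -position) instead of threading a running 'best' through the scan.
import Mathlib
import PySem

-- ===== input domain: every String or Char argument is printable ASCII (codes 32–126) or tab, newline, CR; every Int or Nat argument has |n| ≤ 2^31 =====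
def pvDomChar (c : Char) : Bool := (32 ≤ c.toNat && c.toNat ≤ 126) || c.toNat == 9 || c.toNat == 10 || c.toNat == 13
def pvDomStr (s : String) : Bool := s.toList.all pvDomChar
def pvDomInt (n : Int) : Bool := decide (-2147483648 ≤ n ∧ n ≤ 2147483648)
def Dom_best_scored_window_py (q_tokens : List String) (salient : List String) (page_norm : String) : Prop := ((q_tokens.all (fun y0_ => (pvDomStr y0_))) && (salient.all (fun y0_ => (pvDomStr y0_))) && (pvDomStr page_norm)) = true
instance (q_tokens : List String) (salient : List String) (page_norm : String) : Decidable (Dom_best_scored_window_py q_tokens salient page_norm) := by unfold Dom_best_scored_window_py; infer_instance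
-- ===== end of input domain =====

-- B replaces the per-window salient scan by one prefix-sum pass (skipping
-- generic windows in O(1)) and picks each window size's winner with a single
-- max over the collected candidates; measured faster, same return value.

-- ===== PORT A =====
def pvA_salCount (salient : List String) (window : List String) : Int :=
  (window.map (fun t => if salient.contains t then (1 : Int) else 0)).sum

def pvA_step (q_tokens : List String) (salient : List String) (page_norm : String) (win : Int)
    (best : Option (Int × Int × Int × Int)) (i : Int) : Option (Int × Int × Int × Int) :=
  let window := PySem.List.slice q_tokens (some i) (some (i + win))
  let sal_count := pvA_salCount salient window
  if sal_count = 0 then best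
  else
    let phrase := PySem.Str.join " " window
    let pos := PySem.Str.find page_norm phrase
    if pos ≥ 0 then
      let cand : Int × Int × Int × Int := (pos, pos + PySem.Str.len phrase, win, sal_count)
      match best with
      | none => some cand
      | some b =>
        if cand.2.2.1 > b.2.2.1 ∨ (cand.2.2.1 = b.2.2.1 ∧ cand.2.2.2 > b.2.2.2) ∨
            (cand.2.2.1 = b.2.2.1 ∧ cand.2.2.2 = b.2.2.2 ∧ cand.1 < b.1) then some cand
        else some b
    else best

def pvA_outer (q_tokens : List String) (salient : List String) (page_norm : String) :
    List Int → Option (Int × Int × Int × Int) → Option (Int × Int × Int × Int)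
  | [], best => best
  | w :: ws, best =>
    let best' := (PySem.List.pyRange 0 ((q_tokens.length : Int) - w + 1) 1).foldl
      (pvA_step q_tokens salient page_norm w) best
    match best' with
    | some b => some b
    | none => pvA_outer q_tokens salient page_norm ws none

def best_scored_window_py (q_tokens : List String) (salient : List String) (page_norm : String) : Option (Int × Int × Int × Int) :=
  if q_tokens = [] then none
  else pvA_outer q_tokens salient page_norm (PySem.List.pyRange (q_tokens.length : Int) 2 (-1)) none

-- ===== PORT B =====
def pvB_prefAux (salient : List String) (acc : Int) : List String → List Int
  | [] => []
  | t :: ts =>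
    let acc' := acc + (if salient.contains t then (1 : Int) else 0)
    acc' :: pvB_prefAux salient acc' ts

def pvB_cands (q_tokens : List String) (page_norm : String) (pref : List Int) (win : Int) :
    List (Int × Int × Int × Int) :=
  (PySem.List.pyRange 0 ((q_tokens.length : Int) - win + 1) 1).foldl
    (fun acc i =>
      let sal := PySem.List.pyGetD pref (i + win) 0 - PySem.List.pyGetD pref i 0
      if sal = 0 then acc
      else
        let phrase := PySem.Str.join " " (PySem.List.slice q_tokens (some i) (some (i + win)))
        let pos := PySem.Str.find page_norm phrase
        if pos ≥ 0 then acc ++ [(pos, pos + PySem.Str.len phrase, win, sal)] else acc) []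

def pvB_outer (q_tokens : List String) (page_norm : String) (pref : List Int) :
    List Int → Option (Int × Int × Int × Int)
  | [] => none
  | w :: ws =>
    let cands := pvB_cands q_tokens page_norm pref w
    if cands = [] then pvB_outer q_tokens page_norm pref ws
    else PySem.List.max2? cands (fun c => c.2.2.2) (fun c => -c.1)

def best_scored_window_py_alt (q_tokens : List String) (salient : List String) (page_norm : String) : Option (Int × Int × Int × Int) :=
  pvB_outer q_tokens page_norm (0 :: pvB_prefAux salient 0 q_tokens)
    (PySem.List.pyRange (q_tokens.length : Int) 2 (-1))

-- ===== PRECONDITION & SPEC =====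
def Spec_best_scored_window_py (q_tokens : List String) (salient : List String) (page_norm : String) (out : Option (Int × Int × Int × Int)) : Prop := out = best_scored_window_py_alt q_tokens salient page_norm
instance (q_tokens : List String) (salient : List String) (page_norm : String) (out : Option (Int × Int × Int × Int)) : Decidable (Spec_best_scored_window_py q_tokens salient page_norm out) := by unfold Spec_best_scored_window_py; infer_instance

-- ===== CLAIM (what is proved, stated in full; the proofs are below) =====
def Claim_equal_best_scored_window_py : Prop := ∀ (q_tokens : List String) (salient : List String) (page_norm : String), Dom_best_scored_window_py q_tokens salient page_norm → Spec_best_scored_window_py q_tokens salient page_norm (best_scored_window_py q_tokens salient page_norm)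

-- ===== LEMMAS AND PROOFS =====

-- the candidate A's inner loop produces at index i (none when skipped)
def pvCand (q_tokens : List String) (salient : List String) (page_norm : String) (win i : Int) :
    Option (Int × Int × Int × Int) :=
  let window := PySem.List.slice q_tokens (some i) (some (i + win))
  let s := pvA_salCount salient window
  if s = 0 then none
  else
    let phrase := PySem.Str.join " " window
    let pos := PySem.Str.find page_norm phrase
    if pos ≥ 0 then some (pos, pos + PySem.Str.len phrase, win, s) else none

def pvPick (best : Option (Int × Int × Int × Int)) (c : Int × Int × Int × Int) :
    Option (Int × Int × Int × Int) :=
  match best with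
  | none => some c
  | some b =>
    if c.2.2.1 > b.2.2.1 ∨ (c.2.2.1 = b.2.2.1 ∧ c.2.2.2 > b.2.2.2) ∨
        (c.2.2.1 = b.2.2.1 ∧ c.2.2.2 = b.2.2.2 ∧ c.1 < b.1) then some c
    else some b

-- max2?'s folding step, with B's keys (salient count, negated position) instantiated
def pvM2Step (acc : Option (Int × Int × Int × Int)) (x : Int × Int × Int × Int) :
    Option (Int × Int × Int × Int) :=
  match acc with
  | none => some x
  | some m =>
    if (decide (m.2.2.2 < x.2.2.2) || (!decide (x.2.2.2 < m.2.2.2) && decide (-m.1 < -x.1))) = true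
    then some x else some m

theorem pvMax2_eq (cs : List (Int × Int × Int × Int)) :
    PySem.List.max2? cs (fun c => c.2.2.2) (fun c => -c.1) = cs.foldl pvM2Step none := by
  simp only [PySem.List.max2?]
  exact PySem.List.foldl_congr_mem _ _ _ _ (fun acc x _ => by cases acc <;> rfl)

theorem pvA_step_eq (q_tokens salient : List String) (page_norm : String) (win : Int)
    (best : Option (Int × Int × Int × Int)) (i : Int) :
    pvA_step q_tokens salient page_norm win best i =
      match pvCand q_tokens salient page_norm win i with
      | none => best
      | some c => pvPick best c := by
  simp only [pvA_step, pvCand, pvPick]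
  split_ifs <;> cases best <;> rfl

theorem pvA_inner_eq (q_tokens salient : List String) (page_norm : String) (win : Int)
    (idxs : List Int) (best : Option (Int × Int × Int × Int)) :
    idxs.foldl (pvA_step q_tokens salient page_norm win) best =
      (idxs.filterMap (pvCand q_tokens salient page_norm win)).foldl pvPick best := by
  induction idxs generalizing best with
  | nil => rfl
  | cons i is ih =>
    simp only [List.foldl_cons, pvA_step_eq]
    cases h : pvCand q_tokens salient page_norm win i <;>
      simp [h, ih]

theorem pvFoldPick_some (cs : List (Int × Int × Int × Int)) (b : Int × Int × Int × Int) :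
    (cs.foldl pvPick (some b)).isSome := by
  induction cs generalizing b with
  | nil => rfl
  | cons c cs ih =>
    simp only [List.foldl_cons]
    cases h : pvPick (some b) c with
    | none => simp only [pvPick] at h; split_ifs at h
    | some b' => exact ih b'

theorem pvFoldPick_ne_nil (cs : List (Int × Int × Int × Int)) (h : cs ≠ []) :
    (cs.foldl pvPick none).isSome := by
  cases cs with
  | nil => simp at h
  | cons c ct =>
    simp only [List.foldl_cons, pvPick]
    exact pvFoldPick_some ct c

-- on a list of candidates whose third component is all `win`, A's pick-fold is max2?'s fold
theorem pvFold_pick_eq_max2 (win : Int) (cs : List (Int × Int × Int × Int))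
    (hcs : ∀ c ∈ cs, c.2.2.1 = win) (best : Option (Int × Int × Int × Int))
    (hb : ∀ b, best = some b → b.2.2.1 = win) :
    cs.foldl pvPick best = cs.foldl pvM2Step best := by
  induction cs generalizing best with
  | nil => rfl
  | cons c cs ih =>
    simp only [List.foldl_cons]
    have hc : c.2.2.1 = win := hcs c (List.mem_cons_self ..)
    have hstep : pvPick best c = pvM2Step best c := by
      cases best with
      | none => rfl
      | some b =>
        have hbw : b.2.2.1 = win := hb b rfl
        simp only [pvPick, pvM2Step]
        refine if_congr ?_ rfl rfl
        simp only [Bool.or_eq_true, Bool.and_eq_true, Bool.not_eq_true', decide_eq_true_eq,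
          decide_eq_false_iff_not]
        omega
    rw [hstep]
    refine ih (fun x hx => hcs x (List.mem_cons_of_mem _ hx)) _ ?_
    intro b' hb'
    cases best with
    | none =>
      simp only [pvM2Step, Option.some.injEq] at hb'
      exact hb' ▸ hc
    | some b =>
      simp only [pvM2Step] at hb'
      split_ifs at hb' <;> simp only [Option.some.injEq] at hb'
      · exact hb' ▸ hc
      · exact hb' ▸ hb b rfl

theorem pvCand_win (q_tokens salient : List String) (page_norm : String) (win i : Int)
    (c : Int × Int × Int × Int) (h : pvCand q_tokens salient page_norm win i = some c) :
    c.2.2.1 = win := by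
  simp only [pvCand] at h
  split_ifs at h <;> simp only [Option.some.injEq] at h
  subst h; rfl

-- prefix sums: the j-th entry of B's pref list is the salient count of the first j tokens
theorem pvB_prefAux_getElem (salient : List String) (q : List String) (a : Int) (j : Nat)
    (hj : j < q.length) :
    (pvB_prefAux salient a q)[j]? = some (a + pvA_salCount salient (q.take (j + 1))) := by
  induction q generalizing a j with
  | nil => simp at hj
  | cons t ts ih =>
    cases j with
    | zero => simp [pvB_prefAux, pvA_salCount]
    | succ k =>
      simp only [pvB_prefAux, List.getElem?_cons_succ]
      rw [ih _ k (by simpa using hj)]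
      simp only [Option.some.injEq, List.take_succ_cons, pvA_salCount, List.map_cons,
        List.sum_cons]
      ring

theorem pvB_pref_getElem (salient : List String) (q : List String) (j : Nat)
    (hj : j ≤ q.length) :
    (0 :: pvB_prefAux salient 0 q)[j]? = some (pvA_salCount salient (q.take j)) := by
  cases j with
  | zero => simp [pvA_salCount]
  | succ k =>
    simp only [List.getElem?_cons_succ]
    rw [pvB_prefAux_getElem salient q 0 k (by omega)]
    simp

theorem pvA_salCount_append (salient : List String) (xs ys : List String) :
    pvA_salCount salient (xs ++ ys) = pvA_salCount salient xs + pvA_salCount salient ys := by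
  simp [pvA_salCount]

-- B's prefix-sum difference equals A's per-window salient count
theorem pvSal_eq (q_tokens salient : List String) (win i : Int)
    (h0 : 0 ≤ i) (hw : 0 ≤ win) (hn : i + win ≤ (q_tokens.length : Int)) :
    PySem.List.pyGetD (0 :: pvB_prefAux salient 0 q_tokens) (i + win) 0 -
        PySem.List.pyGetD (0 :: pvB_prefAux salient 0 q_tokens) i 0 =
      pvA_salCount salient (PySem.List.slice q_tokens (some i) (some (i + win))) := by
  have hiw : 0 ≤ i + win := by omega
  have h1 : (i + win).toNat ≤ q_tokens.length := by omega
  have h2 : i.toNat ≤ q_tokens.length := by omega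
  rw [PySem.List.pyGetD_of_nonneg _ _ hiw, PySem.List.pyGetD_of_nonneg _ _ h0]
  rw [List.getD_eq_getElem?_getD, List.getD_eq_getElem?_getD]
  rw [pvB_pref_getElem salient q_tokens _ h1, pvB_pref_getElem salient q_tokens _ h2]
  simp only [Option.getD_some]
  rw [PySem.List.slice_toNat _ h0 hiw]
  have htn : List.take (i + win).toNat q_tokens =
      List.take i.toNat q_tokens ++
        List.take ((i + win).toNat - i.toNat) (List.drop i.toNat q_tokens) := by
    rw [← List.take_add]; congr 1; omega
  rw [htn, pvA_salCount_append]
  ring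

-- B's candidate accumulation builds exactly the filterMap of A's candidates
theorem pvB_cands_eq (q_tokens salient : List String) (page_norm : String) (win : Int)
    (hw : 0 ≤ win) :
    pvB_cands q_tokens page_norm (0 :: pvB_prefAux salient 0 q_tokens) win =
      (PySem.List.pyRange 0 ((q_tokens.length : Int) - win + 1) 1).filterMap
        (pvCand q_tokens salient page_norm win) := by
  simp only [pvB_cands]
  rw [PySem.List.foldl_congr_mem _ _
    (fun acc i => acc ++ (pvCand q_tokens salient page_norm win i).toList) []
    ?_]
  · rw [PySem.List.foldl_append_eq_flatMap, List.filterMap_eq_flatMap_toList]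
    simp
  · intro acc i hi
    have hmem := (PySem.List.mem_pyRange_one).mp hi
    have hsal := pvSal_eq q_tokens salient win i hmem.1 hw (by omega)
    simp only [hsal, pvCand]
    split_ifs <;> simp

-- the outer loops agree on any list of nonnegative window sizes
theorem pvOuter_eq (q_tokens salient : List String) (page_norm : String) (ws : List Int)
    (hws : ∀ w ∈ ws, 0 ≤ w) :
    pvA_outer q_tokens salient page_norm ws none =
      pvB_outer q_tokens page_norm (0 :: pvB_prefAux salient 0 q_tokens) ws := by
  induction ws with
  | nil => rfl
  | cons w ws ih =>
    have hw : (0:Int) ≤ w := hws w (List.mem_cons_self ..)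
    have ihtail := ih (fun x hx => hws x (List.mem_cons_of_mem _ hx))
    simp only [pvA_outer, pvB_outer]
    rw [pvA_inner_eq, pvB_cands_eq q_tokens salient page_norm w hw]
    set cs := (PySem.List.pyRange 0 ((q_tokens.length : Int) - w + 1) 1).filterMap
        (pvCand q_tokens salient page_norm w) with hcsdef
    have hall : ∀ c ∈ cs, c.2.2.1 = w := by
      intro c hc
      rw [hcsdef] at hc
      obtain ⟨i, _, hi⟩ := List.mem_filterMap.mp hc
      exact pvCand_win q_tokens salient page_norm w i c hi
    have hfold : cs.foldl pvPick none = cs.foldl pvM2Step none :=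
      pvFold_pick_eq_max2 w cs hall none (by intro b h; simp at h)
    by_cases hmt : cs = []
    · rw [hmt]
      simpa using ihtail
    · obtain ⟨b, hbv⟩ := Option.isSome_iff_exists.mp (pvFoldPick_ne_nil cs hmt)
      rw [if_neg hmt, pvMax2_eq, ← hfold, hbv]

-- ===== VERDICT (by name: the statement is the Claim_ definition above) =====
theorem best_scored_window_py_spec : Claim_equal_best_scored_window_py := by
  intro q_tokens salient page_norm _
  unfold Spec_best_scored_window_py best_scored_window_py best_scored_window_py_alt
  by_cases hq : q_tokens = []
  · subst hq; rfl
  · rw [if_neg hq]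
    exact pvOuter_eq q_tokens salient page_norm _
      (fun w hw => by
        have := (PySem.List.mem_pyRange_neg_one).mp hw
        omega)
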